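-- pv_equiv track=rewrite | github.com/wafflehops/2048solver | src/slide.py | slide_left
-- ===== SOURCE A (Python) =====
-- def slide_left(row):
--     left_bound = 0
--     ans = []
--
--     for i in range(len(row)):
--         if row[i] == 2048:
--             ans.append(_slide_left(row[left_bound:i]))
--             left_bound = i + 1
--             ans.append([2048])
--
--     ans.append(_slide_left(row[left_bound:]))
--
--     return [x for y in ans for x in y]
--
-- def _slide_left(row):
--     filtered = list(filter(lambda x : (x != 0), row))
--
--     return filtered + [0] * (len(row) - len(filtered))
-- ===== SOURCE B (Python) =====
-- def slide_left(row):
--     # One in-place pass with a write pointer instead of slicing into segments,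
--     # filtering each, padding and flattening.
--     result = [0] * len(row)
--     w = 0
--     for i in range(len(row)):
--         v = row[i]
--         if v == 2048:
--             result[i] = 2048
--             w = i + 1
--         elif v != 0:
--             result[w] = v
--             w += 1
--     return result
-- ===== Notes on version B (the rewrite author's own statement) =====
-- stated objective: alternative
-- what changed: Replaces A's slice-into-segments / filter-and-pad helper / flatten pipeline with a single pass over the row maintaining a preallocated output buffer and a write pointer (walls pin the pointer past their index).
import Mathlib
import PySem

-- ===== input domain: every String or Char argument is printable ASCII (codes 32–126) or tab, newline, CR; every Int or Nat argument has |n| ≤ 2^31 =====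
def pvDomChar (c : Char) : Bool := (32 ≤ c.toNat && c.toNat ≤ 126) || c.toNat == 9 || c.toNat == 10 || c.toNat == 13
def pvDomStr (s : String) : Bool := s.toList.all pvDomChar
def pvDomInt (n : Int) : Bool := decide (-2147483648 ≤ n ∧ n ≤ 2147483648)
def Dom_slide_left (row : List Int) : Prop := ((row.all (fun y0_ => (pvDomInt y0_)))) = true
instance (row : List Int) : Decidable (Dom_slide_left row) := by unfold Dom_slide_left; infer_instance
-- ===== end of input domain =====

-- B replaces A's slice-into-segments, filter-and-pad and flatten with one pass over a
-- preallocated output buffer and a write pointer (objective: alternative decomposition).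

-- ===== PORT A =====
-- _slide_left: filter out zeros, pad with zeros to the original length
def pySlideSub (row : List Int) : List Int :=
  let filtered := row.filter (fun x => x ≠ 0)
  filtered ++ List.replicate (row.length - filtered.length) 0

-- the 'for i in range(len(row))' loop of A, carrying (left_bound, ans)
def slideLoopA (row : List Int) : List Int → Nat → Nat → List (List Int) → Nat × List (List Int)
  | [], _i, lb, ans => (lb, ans)
  | v :: rest, i, lb, ans =>
      if v = 2048 then
        slideLoopA row rest (i + 1) (i + 1)
          (ans ++ [pySlideSub (PySem.List.slice row (some (lb : Int)) (some (i : Int))), [2048]])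
      else
        slideLoopA row rest (i + 1) lb ans

-- the final 'ans.append(_slide_left(row[left_bound:]))' and the flattening comprehension
def slideFinishA (row : List Int) (st : Nat × List (List Int)) : List Int :=
  (st.2 ++ [pySlideSub (PySem.List.slice row (some (st.1 : Int)) none)]).flatMap id

def slide_left (row : List Int) : List Int :=
  slideFinishA row (slideLoopA row row 0 0 [])

-- ===== PORT B =====
-- B's loop: index i, write pointer w, result list updated in place
def slideLoopB : List Int → Nat → Nat → List Int → List Int
  | [], _i, _w, res => res
  | v :: rest, i, w, res =>
      if v = 2048 then slideLoopB rest (i + 1) (i + 1) (res.set i 2048)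
      else if v ≠ 0 then slideLoopB rest (i + 1) (w + 1) (res.set w v)
      else slideLoopB rest (i + 1) w res

def slide_left_alt (row : List Int) : List Int :=
  slideLoopB row 0 0 (List.replicate row.length 0)

-- ===== PRECONDITION & SPEC =====
def Spec_slide_left (row : List Int) (out : List Int) : Prop := out = slide_left_alt row
instance (row : List Int) (out : List Int) : Decidable (Spec_slide_left row out) := by unfold Spec_slide_left; infer_instance

-- ===== CLAIM (what is proved, stated in full; the proofs are below) =====
def Claim_equal_slide_left : Prop := ∀ (row : List Int), Dom_slide_left row → Spec_slide_left row (slide_left row)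

-- ===== LEMMAS AND PROOFS =====

lemma set_replicate_zero (j m : Nat) (a : Int) (h : j < m) :
    (List.replicate m (0 : Int)).set j a
      = List.replicate j 0 ++ a :: List.replicate (m - j - 1) 0 := by
  induction j generalizing m with
  | zero =>
    cases m with
    | zero => omega
    | succ m => simp [List.replicate_succ]
  | succ j ih =>
    cases m with
    | zero => omega
    | succ m =>
      simp only [List.replicate_succ, List.set_cons_succ, List.cons_append]
      rw [ih m (by omega)]
      have : m + 1 - (j + 1) - 1 = m - j - 1 := by omega
      rw [this]

-- setting index i (past the data d ++ nz) inside the zero tail: a wall write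
lemma set_state_wall (d nz : List Int) (lb i n : Nat)
    (hd : d.length = lb) (hnz : lb + nz.length ≤ i) (hin : i < n) :
    (d ++ nz ++ List.replicate (n - (lb + nz.length)) (0:Int)).set i 2048
      = d ++ (nz ++ List.replicate (i - lb - nz.length) 0 ++ [2048]) ++ List.replicate (n - (i+1)) 0 := by
  rw [← List.append_assoc, List.set_append_right _ _ (by simp [hd]; omega)]
  rw [set_replicate_zero _ _ _ (by simp [hd]; omega)]
  simp only [List.length_append, hd, List.append_assoc]
  have c1 : i - (lb + nz.length) = i - lb - nz.length := by omega
  have c2 : n - (lb + nz.length) - (i - lb - nz.length) - 1 = n - (i + 1) := by omega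
  rw [c1, c2]
  simp

-- setting index lb + |nz| (the write pointer) turns the first tail zero into v
lemma set_state_push (d nz : List Int) (lb n : Nat) (v : Int)
    (hd : d.length = lb) (hwn : lb + nz.length < n) :
    (d ++ nz ++ List.replicate (n - (lb + nz.length)) (0:Int)).set (lb + nz.length) v
      = d ++ (nz ++ [v]) ++ List.replicate (n - (lb + nz.length + 1)) 0 := by
  rw [← List.append_assoc, List.set_append_right _ _ (by simp [hd])]
  rw [set_replicate_zero _ _ _ (by simp [hd]; omega)]
  simp only [List.length_append, hd, List.append_assoc]
  have c2 : n - (lb + nz.length) - (lb + nz.length - (lb + nz.length)) - 1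
      = n - (lb + nz.length + 1) := by omega
  rw [c2]
  simp

-- the loop invariant: with row = pre ++ suf processed up to pre.length, A's continuation
-- (flattened) equals B's continuation from write pointer lb + |nonzeros of pre[lb:]| on the
-- partially written buffer
lemma key (suf : List Int) : ∀ (pre : List Int) (ans : List (List Int)) (lb : Nat),
    lb ≤ pre.length → ans.flatten.length = lb →
    slideFinishA (pre ++ suf) (slideLoopA (pre ++ suf) suf pre.length lb ans)
      = slideLoopB suf pre.length (lb + ((pre.drop lb).filter (fun x => x ≠ 0)).length)
          (ans.flatten ++ (pre.drop lb).filter (fun x => x ≠ 0) ++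
            List.replicate ((pre.length + suf.length)
              - (lb + ((pre.drop lb).filter (fun x => x ≠ 0)).length)) 0) := by
  induction suf with
  | nil =>
    intro pre ans lb hlb hans
    simp only [List.append_nil, slideLoopA, slideLoopB, slideFinishA]
    rw [PySem.List.slice_from_natCast]
    simp only [pySlideSub, List.flatten_append, List.flatten_cons, List.flatten_nil,
      List.append_nil, List.length_drop, List.length_nil, Nat.add_zero, List.append_assoc]
    have h1 : pre.length - lb - (List.filter (fun x => decide (x ≠ 0)) (List.drop lb pre)).length
        = pre.length - (lb + (List.filter (fun x => decide (x ≠ 0)) (List.drop lb pre)).length) := by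
      omega
    rw [h1]
    simp [List.flatMap_id]
  | cons v rest ih =>
    intro pre ans lb hlb hans
    have hdrop : (pre ++ v :: rest).drop lb = pre.drop lb ++ v :: rest :=
      List.drop_append_of_le_length hlb
    have hnzlen : ((pre.drop lb).filter (fun x => x ≠ 0)).length ≤ pre.length - lb := by
      have h1 := List.length_filter_le (fun x => decide (x ≠ 0)) (pre.drop lb)
      have h2 : (pre.drop lb).length = pre.length - lb := by simp
      omega
    simp only [slideLoopA, slideLoopB]
    by_cases h2048 : v = 2048
    · subst h2048
      simp only [if_pos rfl, decide_true, ite_true]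
      have hslice : PySem.List.slice (pre ++ (2048:Int) :: rest) (some (lb : Int)) (some (pre.length : Int))
          = pre.drop lb := by
        rw [PySem.List.slice_natCast, hdrop]
        rw [List.take_append_of_le_length (by simp)]
        apply List.take_of_length_le
        simp
      have happ : pre ++ (2048:Int) :: rest = (pre ++ [2048]) ++ rest := by simp
      have hlen2 : pre.length + 1 = (pre ++ [(2048:Int)]).length := by simp
      rw [hslice, happ, hlen2]
      rw [ih (pre ++ [2048]) (ans ++ [pySlideSub (pre.drop lb), [2048]]) (pre ++ [(2048:Int)]).length
        (Nat.le_refl _)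
        (by
          have hsub := List.length_filter_le (fun x => !decide (x = (0:Int))) (pre.drop lb)
          simp at hsub
          simp [pySlideSub, hans]
          omega)]
      rw [set_state_wall _ _ lb pre.length _ hans (by omega) (by simp)]
      simp [pySlideSub]
      have hc : pre.length + (rest.length + 1) - (pre.length + 1) = rest.length := by omega
      rw [hc]
    · by_cases h0 : v = 0
      · subst h0
        simp only [if_neg h2048, ite_false]
        have happ : pre ++ (0:Int) :: rest = (pre ++ [0]) ++ rest := by simp
        have hlen2 : pre.length + 1 = (pre ++ [(0:Int)]).length := by simp
        rw [happ, hlen2, ih (pre ++ [0]) ans lb (by simp; omega) hans]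
        have hd : (pre ++ [(0:Int)]).drop lb = pre.drop lb ++ [0] :=
          List.drop_append_of_le_length hlb
        rw [hd]
        simp only [List.filter_append, List.filter_cons, List.filter_nil, decide_eq_true_eq]
        have hc : pre.length + 1 + rest.length = pre.length + (rest.length + 1) := by omega
        simp [hc]
      · simp only [if_neg h2048]
        have happ : pre ++ v :: rest = (pre ++ [v]) ++ rest := by simp
        have hlen2 : pre.length + 1 = (pre ++ [v]).length := by simp
        rw [happ, hlen2, ih (pre ++ [v]) ans lb (by simp; omega) hans]
        have hd : (pre ++ [v]).drop lb = pre.drop lb ++ [v] :=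
          List.drop_append_of_le_length hlb
        rw [hd]
        have hfil : (pre.drop lb ++ [v]).filter (fun x => x ≠ 0)
            = (pre.drop lb).filter (fun x => x ≠ 0) ++ [v] := by
          simp [List.filter_append, h0]
        rw [hfil]
        rw [set_state_push _ _ lb _ v hans (by simp only [List.length_cons]; omega)]
        have hc : pre.length + 1 + rest.length = pre.length + (rest.length + 1) := by omega
        simp [h0, hc, Nat.add_assoc]

theorem slide_left_eq_alt (row : List Int) : slide_left row = slide_left_alt row := by
  have h := key row [] [] 0 (by simp) (by simp)
  simpa [slide_left, slide_left_alt] using h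

-- ===== VERDICT (by name: the statement is the Claim_ definition above) =====
theorem slide_left_spec : Claim_equal_slide_left := by
  intro row _
  unfold Spec_slide_left
  exact slide_left_eq_alt row
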